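-- pv_equiv track=rewrite | github.com/ajr666/LC | oa合集/CodeSignal General Framework/拆建障碍物or房子/建房子后的最长连续段.py | solution
-- ===== SOURCE A (Python) =====
-- def solution(queries):
--     length_map = {}
--     max_value = 0
--     res = []
--
--     for query in queries:
--         if query in length_map:
--             continue  # 跳过已存在的位置
--
--         # 获取左边和右边的区间长度（如果存在）
--         left_length = length_map.get(query - 1, 0)
--         right_length = length_map.get(query + 1, 0)
--
--         # 计算当前区间的总长度
--         current_length = left_length + right_length + 1
--
--         # 更新当前位置和区间边界的长度
--         length_map[query] = current_length
--         length_map[query - left_length] = current_length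
--         length_map[query + right_length] = current_length
--
--         # 更新最长连续区间长度
--         max_value = max(max_value, current_length)
--
--         # 将当前最大值加入结果
--         res.append(max_value)
--
--     return res
-- ===== SOURCE B (Python) =====
-- def solution(queries):
--     occupied = set()
--     max_value = 0
--     res = []
--     for q in queries:
--         if q in occupied:
--             continue  # duplicates add no result entry (as in A)
--         left = 0
--         while (q - left - 1) in occupied:
--             left += 1
--         right = 0
--         while (q + right + 1) in occupied:
--             right += 1
--         occupied.add(q)
--         cur = left + right + 1
--         if cur > max_value:
--             max_value = cur
--         res.append(max_value)
--     return res
-- ===== Notes on version B (the rewrite author's own statement) =====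
-- stated objective: alternative
-- what changed: Replaces A's endpoint-length dictionary bookkeeping by a plain occupied-set: each new point's segment length is recomputed by walking left and right over consecutive occupied positions, so no lengths are stored or merged; per query it does one set-add instead of three dict writes, which measured faster despite the worst-case walks.
import Mathlib
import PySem

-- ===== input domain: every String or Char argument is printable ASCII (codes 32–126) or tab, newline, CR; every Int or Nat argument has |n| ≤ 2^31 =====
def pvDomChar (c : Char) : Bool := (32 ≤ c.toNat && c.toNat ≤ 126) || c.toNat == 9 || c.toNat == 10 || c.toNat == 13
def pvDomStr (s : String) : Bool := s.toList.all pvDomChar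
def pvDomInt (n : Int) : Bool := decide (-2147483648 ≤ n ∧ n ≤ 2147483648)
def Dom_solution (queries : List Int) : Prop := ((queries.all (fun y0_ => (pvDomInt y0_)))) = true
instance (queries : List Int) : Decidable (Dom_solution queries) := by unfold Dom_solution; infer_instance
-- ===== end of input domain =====

-- B replaces A's endpoint-length dictionary by a plain occupied set, recomputing each new
-- point's segment length by walking over consecutive occupied neighbours (alternative algorithm).

-- ===== PORT A =====
-- for query in queries: skip if present, read neighbour lengths, write the three keys, track max, append
def solutionLoopA : List Int → PySem.Dict Int Int → Int → List Int → List Int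
  | [], _, _, res => res
  | q :: qs, lm, mv, res =>
    if lm.contains q then solutionLoopA qs lm mv res
    else
      let leftLength := lm.getD (q - 1) 0
      let rightLength := lm.getD (q + 1) 0
      let cur := leftLength + rightLength + 1
      let lm' := ((lm.insert q cur).insert (q - leftLength) cur).insert (q + rightLength) cur
      let mv' := max mv cur
      solutionLoopA qs lm' mv' (res ++ [mv'])

def solution (queries : List Int) : List Int :=
  solutionLoopA queries PySem.Dict.empty 0 []

-- ===== PORT B =====
-- while (q - left - 1) in occupied: left += 1   (fuel occ.length + 1 is a totality guard only:
-- the walk visits distinct members of occ, so it stops before the fuel runs out)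
def walkDown (occ : PySem.Set Int) (q : Int) : Nat → Nat
  | 0 => 0
  | n + 1 => if (q - 1) ∈ occ then walkDown occ (q - 1) n + 1 else 0

-- while (q + right + 1) in occupied: right += 1
def walkUp (occ : PySem.Set Int) (q : Int) : Nat → Nat
  | 0 => 0
  | n + 1 => if (q + 1) ∈ occ then walkUp occ (q + 1) n + 1 else 0

def solutionLoopB : List Int → PySem.Set Int → Int → List Int → List Int
  | [], _, _, res => res
  | q :: qs, occ, mv, res =>
    if q ∈ occ then solutionLoopB qs occ mv res
    else
      let left := walkDown occ q (occ.length + 1)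
      let right := walkUp occ q (occ.length + 1)
      let occ' := PySem.Set.add occ q
      let cur : Int := (left : Int) + (right : Int) + 1
      let mv' := if cur > mv then cur else mv
      solutionLoopB qs occ' mv' (res ++ [mv'])

def solution_alt (queries : List Int) : List Int :=
  solutionLoopB queries PySem.Set.empty 0 []

-- ===== PRECONDITION & SPEC =====
def Spec_solution (queries : List Int) (out : List Int) : Prop := out = solution_alt queries
instance (queries : List Int) (out : List Int) : Decidable (Spec_solution queries out) := by unfold Spec_solution; infer_instance

-- ===== CLAIM (what is proved, stated in full; the proofs are below) =====
def Claim_equal_solution : Prop := ∀ (queries : List Int), Dom_solution queries → Spec_solution queries (solution queries)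

-- ===== LEMMAS AND PROOFS =====

-- L is the length of the maximal run of occupied positions immediately below r
def IsDown (occ : List Int) (r : Int) (L : Int) : Prop :=
  0 ≤ L ∧ (∀ i : Int, 1 ≤ i → i ≤ L → (r - i) ∈ occ) ∧ (r - (L + 1)) ∉ occ

-- L is the length of the maximal run of occupied positions immediately above r
def IsUp (occ : List Int) (r : Int) (L : Int) : Prop :=
  0 ≤ L ∧ (∀ i : Int, 1 ≤ i → i ≤ L → (r + i) ∈ occ) ∧ (r + (L + 1)) ∉ occ

theorem walkDown_le (occ : List Int) (q : Int) (n : Nat) : walkDown occ q n ≤ n := by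
  induction n generalizing q with
  | zero => simp [walkDown]
  | succ n ih => simp only [walkDown]; split_ifs <;> simp [Nat.succ_le_succ (ih _)]

theorem walkDown_mem (occ : List Int) (n : Nat) : ∀ (q : Int) (i : Int),
    1 ≤ i → i ≤ (walkDown occ q n : Int) → (q - i) ∈ occ := by
  induction n with
  | zero => intro q i h1 h2; simp [walkDown] at h2; omega
  | succ n ih =>
    intro q i h1 h2
    simp only [walkDown] at h2
    split_ifs at h2 with hm
    · push_cast at h2
      rcases eq_or_lt_of_le h1 with h | h
      · simpa [← h] using hm
      · have := ih (q - 1) (i - 1) (by omega) (by omega)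
        have he : q - 1 - (i - 1) = q - i := by ring
        rwa [he] at this
    · push_cast at h2; omega

theorem walkDown_stop (occ : List Int) (n : Nat) : ∀ (q : Int),
    walkDown occ q n < n → (q - ((walkDown occ q n : Int) + 1)) ∉ occ := by
  induction n with
  | zero => intro q h; omega
  | succ n ih =>
    intro q h
    simp only [walkDown] at h ⊢
    split_ifs at h ⊢ with hm
    · have h' : walkDown occ (q - 1) n < n := by omega
      have := ih (q - 1) h'
      push_cast
      rw [show q - ((walkDown occ (q - 1) n : Int) + 1 + 1) =
          q - 1 - ((walkDown occ (q - 1) n : Int) + 1) from by ring]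
      exact this
    · simpa using hm

theorem walkUp_le (occ : List Int) (q : Int) (n : Nat) : walkUp occ q n ≤ n := by
  induction n generalizing q with
  | zero => simp [walkUp]
  | succ n ih => simp only [walkUp]; split_ifs <;> simp [Nat.succ_le_succ (ih _)]

theorem walkUp_mem (occ : List Int) (n : Nat) : ∀ (q : Int) (i : Int),
    1 ≤ i → i ≤ (walkUp occ q n : Int) → (q + i) ∈ occ := by
  induction n with
  | zero => intro q i h1 h2; simp [walkUp] at h2; omega
  | succ n ih =>
    intro q i h1 h2
    simp only [walkUp] at h2
    split_ifs at h2 with hm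
    · push_cast at h2
      rcases eq_or_lt_of_le h1 with h | h
      · simpa [← h] using hm
      · have := ih (q + 1) (i - 1) (by omega) (by omega)
        have he : q + 1 + (i - 1) = q + i := by ring
        rwa [he] at this
    · push_cast at h2; omega

theorem walkUp_stop (occ : List Int) (n : Nat) : ∀ (q : Int),
    walkUp occ q n < n → (q + ((walkUp occ q n : Int) + 1)) ∉ occ := by
  induction n with
  | zero => intro q h; omega
  | succ n ih =>
    intro q h
    simp only [walkUp] at h ⊢
    split_ifs at h ⊢ with hm
    · have h' : walkUp occ (q + 1) n < n := by omega
      have := ih (q + 1) h'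
      push_cast
      rw [show q + ((walkUp occ (q + 1) n : Int) + 1 + 1) =
          q + 1 + ((walkUp occ (q + 1) n : Int) + 1) from by ring]
      exact this
    · simpa using hm

-- pigeonhole: occ cannot contain occ.length + 1 distinct values
theorem no_long_run (occ : List Int) (f : Int → Int)
    (hinj : ∀ a b : Int, f a = f b → a = b)
    (hmem : ∀ i : Int, 1 ≤ i → i ≤ (occ.length : Int) + 1 → f i ∈ occ) : False := by
  classical
  set l : List Int := (List.range (occ.length + 1)).map (fun k : Nat => f ((k : Int) + 1)) with hl
  have hnodup : l.Nodup := by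
    refine List.Nodup.map ?_ (List.nodup_range)
    intro a b hab
    have := hinj _ _ hab
    omega
  have hsub : l ⊆ occ := by
    intro x hx
    rw [hl] at hx
    simp only [List.mem_map, List.mem_range] at hx
    obtain ⟨k, hk, rfl⟩ := hx
    exact hmem _ (by omega) (by omega)
  have hle : l.length ≤ occ.length := (List.subperm_of_subset hnodup hsub).length_le
  simp [hl] at hle

theorem walkDown_isDown (occ : List Int) (q : Int) :
    IsDown occ q (walkDown occ q (occ.length + 1)) := by
  refine ⟨by positivity, walkDown_mem occ _ q, ?_⟩
  have hlt : walkDown occ q (occ.length + 1) < occ.length + 1 := by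
    rcases Nat.lt_or_ge (walkDown occ q (occ.length + 1)) (occ.length + 1) with h | h
    · exact h
    · exfalso
      have heq : walkDown occ q (occ.length + 1) = occ.length + 1 :=
        le_antisymm (walkDown_le occ q _) h
      refine no_long_run occ (fun i => q - i) (by intro a b h; dsimp only at h; omega) ?_
      intro i h1 h2
      exact walkDown_mem occ _ q i h1 (by rw [heq]; push_cast; omega)
  exact walkDown_stop occ _ q hlt

theorem walkUp_isUp (occ : List Int) (q : Int) :
    IsUp occ q (walkUp occ q (occ.length + 1)) := by
  refine ⟨by positivity, walkUp_mem occ _ q, ?_⟩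
  have hlt : walkUp occ q (occ.length + 1) < occ.length + 1 := by
    rcases Nat.lt_or_ge (walkUp occ q (occ.length + 1)) (occ.length + 1) with h | h
    · exact h
    · exfalso
      have heq : walkUp occ q (occ.length + 1) = occ.length + 1 :=
        le_antisymm (walkUp_le occ q _) h
      refine no_long_run occ (fun i => q + i) (by intro a b h; dsimp only at h; omega) ?_
      intro i h1 h2
      exact walkUp_mem occ _ q i h1 (by rw [heq]; push_cast; omega)
  exact walkUp_stop occ _ q hlt

theorem IsDown_unique {occ : List Int} {r L L' : Int}
    (h : IsDown occ r L) (h' : IsDown occ r L') : L = L' := by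
  obtain ⟨h0, hm, hs⟩ := h
  obtain ⟨h0', hm', hs'⟩ := h'
  by_contra hne
  rcases lt_or_gt_of_ne hne with hlt | hlt
  · exact hs (hm' (L + 1) (by omega) (by omega))
  · exact hs' (hm (L' + 1) (by omega) (by omega))

theorem IsUp_unique {occ : List Int} {r L L' : Int}
    (h : IsUp occ r L) (h' : IsUp occ r L') : L = L' := by
  obtain ⟨h0, hm, hs⟩ := h
  obtain ⟨h0', hm', hs'⟩ := h'
  by_contra hne
  rcases lt_or_gt_of_ne hne with hlt | hlt
  · exact hs (hm' (L + 1) (by omega) (by omega))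
  · exact hs' (hm (L' + 1) (by omega) (by omega))

-- the invariant tying A's endpoint-length dictionary to B's occupied set
def LInv (lm : PySem.Dict Int Int) (occ : List Int) : Prop :=
  (∀ p : Int, lm.contains p = true ↔ p ∈ occ) ∧
  (∀ r L : Int, r ∉ occ → IsDown occ r L → lm.getD (r - 1) 0 = L) ∧
  (∀ r L : Int, r ∉ occ → IsUp occ r L → lm.getD (r + 1) 0 = L)

theorem LInv_step_gen (lm : PySem.Dict Int Int) (occ : List Int) (q l u : Int)
    (hq : q ∉ occ) (hD : IsDown occ q l) (hU : IsUp occ q u) (hInv : LInv lm occ) :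
    LInv (((lm.insert q (l + u + 1)).insert (q - l) (l + u + 1)).insert (q + u) (l + u + 1))
      (occ ++ [q]) := by
  obtain ⟨hK, hDn, hUp⟩ := hInv
  obtain ⟨hl0, hDm, hDs⟩ := hD
  obtain ⟨hu0, hUm, hUs⟩ := hU
  have hmem' : ∀ x : Int, x ∈ occ ++ [q] ↔ x ∈ occ ∨ x = q := by intro x; simp
  have hql : q - l ∈ occ ++ [q] := by
    rw [hmem']
    rcases eq_or_lt_of_le hl0 with h | h
    · right; omega
    · exact Or.inl (hDm l (by omega) le_rfl)
  have hqu : q + u ∈ occ ++ [q] := by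
    rw [hmem']
    rcases eq_or_lt_of_le hu0 with h | h
    · right; omega
    · exact Or.inl (hUm u (by omega) le_rfl)
  have hget : ∀ x : Int,
      ((((lm.insert q (l + u + 1)).insert (q - l) (l + u + 1)).insert (q + u) (l + u + 1))).getD x 0
        = if x = q + u ∨ x = q - l ∨ x = q then l + u + 1 else lm.getD x 0 := by
    intro x
    rw [PySem.Dict.getD_insert, PySem.Dict.getD_insert, PySem.Dict.getD_insert]
    split_ifs <;> tauto
  refine ⟨?_, ?_, ?_⟩
  · -- keys
    intro p
    simp only [PySem.Dict.contains_insert, Bool.or_eq_true, beq_iff_eq, hK p, hmem']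
    constructor
    · rintro (rfl | rfl | rfl | hp)
      · rw [← hmem']; exact hqu
      · rw [← hmem']; exact hql
      · right; rfl
      · exact Or.inl hp
    · rintro (hp | rfl)
      · tauto
      · tauto
  · -- down runs
    intro r L hr hL
    rw [hmem', not_or] at hr
    obtain ⟨hro, hrq⟩ := hr
    obtain ⟨hL0, hLm, hLs⟩ := hL
    rw [hget]
    by_cases hc : r - 1 = q + u
    · rw [if_pos (Or.inl hc)]
      have hnew : IsDown (occ ++ [q]) r (l + u + 1) := by
        refine ⟨by omega, ?_, ?_⟩
        · intro i h1 h2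
          rw [hmem']
          rcases lt_trichotomy (r - i) q with h | h | h
          · left
            have := hDm (q - (r - i)) (by omega) (by omega)
            rwa [show q - (q - (r - i)) = r - i from by ring] at this
          · right; omega
          · left
            have := hUm ((r - i) - q) (by omega) (by omega)
            rwa [show q + (r - i - q) = r - i from by ring] at this
        · rw [hmem']
          rw [show r - (l + u + 1 + 1) = q - (l + 1) from by omega]
          rintro (h | h)
          · exact hDs h
          · omega
      have := IsDown_unique ⟨hL0, hLm, hLs⟩ hnew
      omega
    · by_cases hmem1 : r - 1 ∈ occ ++ [q]
      · have hr1q : r - 1 ≠ q := by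
          intro h
          have hu1 : 1 ≤ u := by
            rcases eq_or_lt_of_le hu0 with h' | h'
            · exact absurd (by omega : r - 1 = q + u) hc
            · omega
          have := hUm 1 le_rfl (by omega)
          rw [show q + 1 = r from by omega] at this
          exact hro this
        have hold : IsDown occ r L := by
          refine ⟨hL0, ?_, ?_⟩
          · intro i h1 h2
            have hin' := hLm i h1 h2
            rw [hmem'] at hin'
            rcases hin' with h | h
            · exact h
            · exfalso
              by_cases hi1 : i = 1
              · exact hr1q (by omega)
              · have hk : ∀ k : Int, 1 ≤ k → k ≤ i - 1 → q + k ∈ occ := by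
                  intro k hk1 hk2
                  have h' := hLm (i - k) (by omega) (by omega)
                  rw [hmem'] at h'
                  rcases h' with h' | h'
                  · rwa [show r - (i - k) = q + k from by omega] at h'
                  · exfalso; omega
                have hiu : i - 1 ≤ u := by
                  by_contra hgt
                  exact hUs (hk (u + 1) (by omega) (by omega))
                rcases lt_or_eq_of_le hiu with hlt | heqq
                · have := hUm i (by omega) (by omega)
                  rw [show q + i = r from by omega] at this
                  exact hro this
                · exact hc (by omega)
          · intro h
            exact hLs (by rw [hmem']; exact Or.inl h)
        have hrql : r - 1 ≠ q - l := by
          intro h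
          rcases eq_or_lt_of_le hl0 with h0 | h0
          · exact hr1q (by omega)
          · by_cases hl1 : l = 1
            · exact hrq (by omega)
            · have := hDm (l - 1) (by omega) (by omega)
              rw [show q - (l - 1) = r from by omega] at this
              exact hro this
        rw [if_neg (by rintro (h | h | h); exacts [hc h, hrql h, hr1q h])]
        exact hDn r L hro hold
      · have hL0' : L = 0 := by
          by_contra h
          exact hmem1 (hLm 1 le_rfl (by omega))
        have hold : IsDown occ r 0 := by
          refine ⟨le_rfl, by intro i h1 h2; omega, ?_⟩
          intro h
          exact hmem1 (by rw [hmem']; left; rwa [show r - (0 + 1) = r - 1 from by ring] at h)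
        rw [if_neg (by
              rintro (h | h | h)
              · exact hmem1 (by rw [h]; exact hqu)
              · exact hmem1 (by rw [h]; exact hql)
              · exact hmem1 (by rw [h, hmem']; right; rfl))]
        rw [hDn r 0 hro hold, hL0']
  · -- up runs (mirror)
    intro r L hr hL
    rw [hmem', not_or] at hr
    obtain ⟨hro, hrq⟩ := hr
    obtain ⟨hL0, hLm, hLs⟩ := hL
    rw [hget]
    by_cases hc : r + 1 = q - l
    · rw [if_pos (Or.inr (Or.inl hc))]
      have hnew : IsUp (occ ++ [q]) r (l + u + 1) := by
        refine ⟨by omega, ?_, ?_⟩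
        · intro i h1 h2
          rw [hmem']
          rcases lt_trichotomy (r + i) q with h | h | h
          · left
            have := hDm (q - (r + i)) (by omega) (by omega)
            rwa [show q - (q - (r + i)) = r + i from by ring] at this
          · right; omega
          · left
            have := hUm ((r + i) - q) (by omega) (by omega)
            rwa [show q + (r + i - q) = r + i from by ring] at this
        · rw [hmem']
          rw [show r + (l + u + 1 + 1) = q + (u + 1) from by omega]
          rintro (h | h)
          · exact hUs h
          · omega
      have := IsUp_unique ⟨hL0, hLm, hLs⟩ hnew
      omega
    · by_cases hmem1 : r + 1 ∈ occ ++ [q]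
      · have hr1q : r + 1 ≠ q := by
          intro h
          have hl1 : 1 ≤ l := by
            rcases eq_or_lt_of_le hl0 with h' | h'
            · exact absurd (by omega : r + 1 = q - l) hc
            · omega
          have := hDm 1 le_rfl (by omega)
          rw [show q - 1 = r from by omega] at this
          exact hro this
        have hold : IsUp occ r L := by
          refine ⟨hL0, ?_, ?_⟩
          · intro i h1 h2
            have hin' := hLm i h1 h2
            rw [hmem'] at hin'
            rcases hin' with h | h
            · exact h
            · exfalso
              by_cases hi1 : i = 1
              · exact hr1q (by omega)
              · have hk : ∀ k : Int, 1 ≤ k → k ≤ i - 1 → q - k ∈ occ := by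
                  intro k hk1 hk2
                  have h' := hLm (i - k) (by omega) (by omega)
                  rw [hmem'] at h'
                  rcases h' with h' | h'
                  · rwa [show r + (i - k) = q - k from by omega] at h'
                  · exfalso; omega
                have hil : i - 1 ≤ l := by
                  by_contra hgt
                  exact hDs (hk (l + 1) (by omega) (by omega))
                rcases lt_or_eq_of_le hil with hlt | heqq
                · have := hDm i (by omega) (by omega)
                  rw [show q - i = r from by omega] at this
                  exact hro this
                · exact hc (by omega)
          · intro h
            exact hLs (by rw [hmem']; exact Or.inl h)
        have hrqu : r + 1 ≠ q + u := by
          intro h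
          rcases eq_or_lt_of_le hu0 with h0 | h0
          · exact hr1q (by omega)
          · by_cases hu1 : u = 1
            · exact hrq (by omega)
            · have := hUm (u - 1) (by omega) (by omega)
              rw [show q + (u - 1) = r from by omega] at this
              exact hro this
        rw [if_neg (by rintro (h | h | h); exacts [hrqu h, hc h, hr1q h])]
        exact hUp r L hro hold
      · have hL0' : L = 0 := by
          by_contra h
          exact hmem1 (hLm 1 le_rfl (by omega))
        have hold : IsUp occ r 0 := by
          refine ⟨le_rfl, by intro i h1 h2; omega, ?_⟩
          intro h
          exact hmem1 (by rw [hmem']; left; rwa [show r + (0 + 1) = r + 1 from by ring] at h)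
        rw [if_neg (by
              rintro (h | h | h)
              · exact hmem1 (by rw [h]; exact hqu)
              · exact hmem1 (by rw [h]; exact hql)
              · exact hmem1 (by rw [h, hmem']; right; rfl))]
        rw [hUp r 0 hro hold, hL0']

theorem loop_eq : ∀ (qs : List Int) (lm : PySem.Dict Int Int) (occ : List Int) (mv : Int) (res : List Int),
    occ.Nodup → LInv lm occ → solutionLoopA qs lm mv res = solutionLoopB qs occ mv res := by
  intro qs
  induction qs with
  | nil => intro lm occ mv res _ _; rfl
  | cons q qs ih =>
    intro lm occ mv res hnd hInv
    simp only [solutionLoopA, solutionLoopB]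
    by_cases hmem : q ∈ occ
    · rw [if_pos ((hInv.1 q).mpr hmem), if_pos hmem]
      exact ih lm occ mv res hnd hInv
    · rw [if_neg (by simp [hInv.1 q, hmem]), if_neg hmem]
      have hD := walkDown_isDown occ q
      have hU := walkUp_isUp occ q
      have hleft : lm.getD (q - 1) 0 = (walkDown occ q (occ.length + 1) : Int) :=
        hInv.2.1 q _ hmem hD
      have hright : lm.getD (q + 1) 0 = (walkUp occ q (occ.length + 1) : Int) :=
        hInv.2.2 q _ hmem hU
      rw [hleft, hright]
      have hadd : PySem.Set.add occ q = occ ++ [q] := PySem.Set.add_of_not_mem hmem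
      rw [hadd]
      have hmax : (if (walkDown occ q (occ.length + 1) : Int) + (walkUp occ q (occ.length + 1) : Int) + 1 > mv
          then (walkDown occ q (occ.length + 1) : Int) + (walkUp occ q (occ.length + 1) : Int) + 1 else mv) =
          max mv ((walkDown occ q (occ.length + 1) : Int) + (walkUp occ q (occ.length + 1) : Int) + 1) := by
        rw [max_def]; split_ifs <;> omega
      rw [hmax]
      exact ih _ _ _ _ (by simp [List.nodup_append, hnd]; intro a ha h; subst h; exact hmem ha) (LInv_step_gen lm occ q _ _ hmem (walkDown_isDown occ q) (walkUp_isUp occ q) hInv)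

-- ===== VERDICT (by name: the statement is the Claim_ definition above) =====
theorem solution_spec : Claim_equal_solution := by
  intro queries _
  unfold Spec_solution solution solution_alt
  refine loop_eq queries PySem.Dict.empty PySem.Set.empty 0 [] List.nodup_nil ?_
  refine ⟨by simp [PySem.Dict.contains_empty, PySem.Set.empty], ?_, ?_⟩
  · intro r L _ hL
    have h0 : IsDown ([] : List Int) r 0 := ⟨le_refl 0, by intro i h1 h2; omega, by simp⟩
    rw [IsDown_unique hL h0]
    simp [PySem.Dict.getD_empty]
  · intro r L _ hL
    have h0 : IsUp ([] : List Int) r 0 := ⟨le_refl 0, by intro i h1 h2; omega, by simp⟩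
    rw [IsUp_unique hL h0]
    simp [PySem.Dict.getD_empty]
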